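-- pv_equiv track=rewrite | github.com/mattintech/mattintech.github.io | tools/adb-cmd/utils/manual_verify.py | consolidate_ranges
-- ===== SOURCE A (Python) =====
-- def consolidate_ranges(ranges):
--     """Consolidate multiple version ranges into one"""
--     # Simple version mapping
--     version_order = ['4.0', '4.1', '4.2', '4.3', '4.4', '5.0', '5.1', '6.0',
--                     '7.0', '7.1', '8.0', '8.1', '9.0', '10.0', '11', '12',
--                     '13', '14', '15', '16']
--
--     # Parse ranges to find min and max
--     all_versions = set()
--     has_plus = False
--
--     for range_str in ranges:
--         if range_str == 'All':
--             return 'All'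
--         elif '+' in range_str:
--             has_plus = True
--             base = range_str.replace('+', '')
--             all_versions.add(base)
--             # Add all versions after this one
--             if base in version_order:
--                 idx = version_order.index(base)
--                 all_versions.update(version_order[idx:])
--         elif ' - ' in range_str:
--             parts = range_str.split(' - ')
--             if parts[0] in version_order and parts[1] in version_order:
--                 start_idx = version_order.index(parts[0])
--                 end_idx = version_order.index(parts[1])
--                 all_versions.update(version_order[start_idx:end_idx+1])
--         else:
--             all_versions.add(range_str)
--
--     # Sort versions
--     sorted_versions = []
--     for v in version_order:
--         if v in all_versions:
--             sorted_versions.append(v)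
--
--     if not sorted_versions:
--         return ' + '.join(ranges)
--
--     # Check if continuous
--     first_idx = version_order.index(sorted_versions[0])
--     last_idx = version_order.index(sorted_versions[-1])
--     expected = version_order[first_idx:last_idx+1]
--
--     if sorted_versions == expected:
--         # Continuous range
--         if has_plus or last_idx == len(version_order) - 1:
--             return f"{sorted_versions[0]}+"
--         elif len(sorted_versions) == 1:
--             return sorted_versions[0]
--         else:
--             return f"{sorted_versions[0]} - {sorted_versions[-1]}"
--     else:
--         # Non-continuous
--         return ', '.join(sorted_versions)
-- ===== SOURCE B (Python) =====
-- def consolidate_ranges(ranges):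
--     """Consolidate multiple version ranges into one"""
--     version_order = ['4.0', '4.1', '4.2', '4.3', '4.4', '5.0', '5.1', '6.0',
--                     '7.0', '7.1', '8.0', '8.1', '9.0', '10.0', '11', '12',
--                     '13', '14', '15', '16']
--
--     if 'All' in ranges:
--         return 'All'
--
--     def covers(tok, i):
--         # does this token cover version_order[i]?
--         if '+' in tok:
--             base = tok.replace('+', '')
--             return base in version_order and version_order.index(base) <= i
--         if ' - ' in tok:
--             parts = tok.split(' - ')
--             return (parts[0] in version_order and parts[1] in version_order
--                     and version_order.index(parts[0]) <= i <= version_order.index(parts[1]))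
--         return tok == version_order[i]
--
--     # loop inverted: for each version cell, ask whether any token covers it
--     covered = [i for i in range(len(version_order)) if any(covers(t, i) for t in ranges)]
--
--     if not covered:
--         return ' + '.join(ranges)
--
--     lo, hi = covered[0], covered[-1]
--     has_plus = any('+' in t for t in ranges)
--
--     if len(covered) == hi - lo + 1:
--         if has_plus or hi == len(version_order) - 1:
--             return version_order[lo] + '+'
--         if lo == hi:
--             return version_order[lo]
--         return f"{version_order[lo]} - {version_order[hi]}"
--     return ', '.join(version_order[i] for i in covered)
-- ===== Notes on version B (the rewrite author's own statement) =====
-- stated objective: alternative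
-- what changed: B inverts the traversal: instead of A's mutable set built token-by-token and then re-sorted against version_order, B asks for each of the 20 version cells whether any token covers it (a pure coverage predicate), handles 'All' and has_plus as separate membership/any passes, and derives the formatting from the first/last/count of the covered cells.
import Mathlib
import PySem

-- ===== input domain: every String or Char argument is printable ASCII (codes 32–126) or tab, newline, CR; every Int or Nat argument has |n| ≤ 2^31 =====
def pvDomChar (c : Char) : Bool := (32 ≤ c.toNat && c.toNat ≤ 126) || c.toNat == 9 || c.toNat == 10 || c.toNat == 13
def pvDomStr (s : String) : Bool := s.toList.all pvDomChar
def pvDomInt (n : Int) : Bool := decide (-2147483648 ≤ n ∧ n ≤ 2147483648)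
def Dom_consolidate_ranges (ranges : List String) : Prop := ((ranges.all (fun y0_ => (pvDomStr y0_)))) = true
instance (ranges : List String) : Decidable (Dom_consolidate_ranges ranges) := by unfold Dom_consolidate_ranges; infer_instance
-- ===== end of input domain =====

-- B replaces A's incrementally-built version set by a per-cell coverage predicate (loop inverted:
-- for each of the 20 versions, does any token cover it?), with 'All'/has_plus as separate passes; objective: alternative.

set_option maxHeartbeats 1000000


-- the literal table 'version_order' both Pythons carry
def pvOrder : List String := ["4.0", "4.1", "4.2", "4.3", "4.4", "5.0", "5.1", "6.0",
  "7.0", "7.1", "8.0", "8.1", "9.0", "10.0", "11", "12", "13", "14", "15", "16"]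

-- ===== PORT A =====
-- A's parsing loop; `none` models the early `return 'All'`.
-- (`index?.getD 0`: list.index's ValueError is unreachable — every call is guarded by a membership
-- test; `split?.getD []`: split? is none only for an empty separator; `pyGetD parts 1 ""`:
-- parts[1] exists because ' - ' occurs in the string.)
def pvLoopA : List String → PySem.Set String → Bool → Option (PySem.Set String × Bool)
  | [], av, hp => some (av, hp)
  | r :: rest, av, hp =>
    if r == "All" then none
    else if PySem.Str.isIn "+" r then
      let base := PySem.Str.replace r "+" ""
      let av1 := PySem.Set.add av base
      if pvOrder.contains base then
        let idx := (PySem.List.index? pvOrder base).getD 0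
        pvLoopA rest (PySem.Set.update av1 (PySem.List.slice pvOrder (some (idx : Int)) none)) true
      else pvLoopA rest av1 true
    else if PySem.Str.isIn " - " r then
      let parts := (PySem.Str.split? r " - ").getD []
      let p0 := PySem.List.pyGetD parts 0 ""
      let p1 := PySem.List.pyGetD parts 1 ""
      if pvOrder.contains p0 && pvOrder.contains p1 then
        let sidx := (PySem.List.index? pvOrder p0).getD 0
        let eidx := (PySem.List.index? pvOrder p1).getD 0
        pvLoopA rest (PySem.Set.update av (PySem.List.slice pvOrder (some (sidx : Int)) (some ((eidx : Int) + 1)))) hp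
      else pvLoopA rest av hp
    else pvLoopA rest (PySem.Set.add av r) hp

-- A's code after the loop
def pvFinishA (ranges : List String) (av : PySem.Set String) (hp : Bool) : String :=
  let sv := pvOrder.foldl (fun acc v => if PySem.Set.contains av v then acc ++ [v] else acc) []
  if sv.isEmpty then PySem.Str.join " + " ranges
  else
    let fi := (PySem.List.index? pvOrder (PySem.List.pyGetD sv 0 "")).getD 0
    let li := (PySem.List.index? pvOrder (PySem.List.pyGetD sv (-1) "")).getD 0
    let expected := PySem.List.slice pvOrder (some (fi : Int)) (some ((li : Int) + 1))
    if sv == expected then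
      if hp || (li == pvOrder.length - 1) then PySem.List.pyGetD sv 0 "" ++ "+"
      else if sv.length == 1 then PySem.List.pyGetD sv 0 ""
      else PySem.List.pyGetD sv 0 "" ++ " - " ++ PySem.List.pyGetD sv (-1) ""
    else PySem.Str.join ", " sv

def consolidate_ranges (ranges : List String) : String :=
  match pvLoopA ranges PySem.Set.empty false with
  | none => "All"
  | some (av, hp) => pvFinishA ranges av hp

-- ===== PORT B =====
-- B's coverage predicate covers(tok, i): does this token cover version_order[i]?
-- (`index?.getD 0` is guarded by membership, `split?.getD []` total for nonempty sep,
-- `pyGetD parts 1 ""` exists because ' - ' occurs — same remarks as in port A.)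
def pvCov (tok : String) (i : Int) : Bool :=
  if PySem.Str.isIn "+" tok then
    let base := PySem.Str.replace tok "+" ""
    pvOrder.contains base && (((PySem.List.index? pvOrder base).getD 0 : Int) ≤ i)
  else if PySem.Str.isIn " - " tok then
    let parts := (PySem.Str.split? tok " - ").getD []
    let p0 := PySem.List.pyGetD parts 0 ""
    let p1 := PySem.List.pyGetD parts 1 ""
    (pvOrder.contains p0 && pvOrder.contains p1) &&
      (((PySem.List.index? pvOrder p0).getD 0 : Int) ≤ i && i ≤ ((PySem.List.index? pvOrder p1).getD 0 : Int))
  else tok == PySem.List.pyGetD pvOrder i ""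

-- version_order[i] for an index known to be in range
def pvAt (i : Int) : String := PySem.List.pyGetD pvOrder i ""

-- B's code after the covered-cells comprehension
def pvFinishB (ranges : List String) (covered : List Int) : String :=
  if covered.isEmpty then PySem.Str.join " + " ranges
  else
    let lo := PySem.List.pyGetD covered 0 0
    let hi := PySem.List.pyGetD covered (-1) 0
    let has_plus := ranges.any (fun t => PySem.Str.isIn "+" t)
    if ((covered.length : Int) == hi - lo + 1) then
      if has_plus || (hi == (pvOrder.length : Int) - 1) then pvAt lo ++ "+"
      else if lo == hi then pvAt lo
      else pvAt lo ++ " - " ++ pvAt hi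
    else PySem.Str.join ", " (covered.map (fun i => PySem.List.pyGetD pvOrder i ""))

def consolidate_ranges_alt (ranges : List String) : String :=
  if ranges.contains "All" then "All"
  else pvFinishB ranges ((PySem.List.pyRange 0 (pvOrder.length : Int) 1).filter
    (fun i => ranges.any (fun t => pvCov t i)))

-- ===== PRECONDITION & SPEC =====
def Spec_consolidate_ranges (ranges : List String) (out : String) : Prop := out = consolidate_ranges_alt ranges
instance (ranges : List String) (out : String) : Decidable (Spec_consolidate_ranges ranges out) := by unfold Spec_consolidate_ranges; infer_instance

-- ===== CLAIM (what is proved, stated in full; the proofs are below) =====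
def Claim_equal_consolidate_ranges : Prop := ∀ (ranges : List String), Dom_consolidate_ranges ranges → Spec_consolidate_ranges ranges (consolidate_ranges ranges)

-- ===== LEMMAS AND PROOFS =====

theorem pv_nodup : pvOrder.Nodup := by decide
theorem pv_len : pvOrder.length = 20 := by decide
theorem pv_idx_at : ∀ n, n < 20 → PySem.List.index? pvOrder (pvOrder.getD n "") = some n := by decide

theorem pv_getD_eq (n : Nat) (hn : n < 20) : pvOrder.getD n "" = pvOrder[n]'(pv_len ▸ hn) := by
  simp [List.getD_eq_getElem?_getD, List.getElem?_eq_getElem (pv_len ▸ hn : n < pvOrder.length)]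

theorem pv_mem_iff (v : String) : v ∈ pvOrder ↔ ∃ n : Nat, n < 20 ∧ v = pvOrder.getD n "" := by
  constructor
  · intro h
    obtain ⟨n, hn, he⟩ := List.mem_iff_getElem.mp h
    exact ⟨n, pv_len ▸ hn, by rw [pv_getD_eq n (pv_len ▸ hn)]; exact he.symm⟩
  · rintro ⟨n, hn, rfl⟩
    rw [pv_getD_eq n hn]; exact List.getElem_mem _

theorem pv_eq_iff {v : String} {k : Nat} (hk : PySem.List.index? pvOrder v = some k) (n : Nat) (hn : n < 20) :
    pvOrder.getD n "" = v ↔ n = k := by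
  obtain ⟨hklt, he, _⟩ := PySem.List.getElem_of_index?_eq_some hk
  rw [pv_getD_eq n hn, ← he]
  exact pv_nodup.getElem_inj_iff

theorem pv_index_of_contains {v : String} (hc : pvOrder.contains v = true) :
    ∃ k, PySem.List.index? pvOrder v = some k :=
  Option.isSome_iff_exists.mp ((PySem.List.index?_isSome_iff pvOrder v).mpr (List.contains_iff_mem.mp hc))

theorem mem_drop_take_iff {α : Type} [DecidableEq α] (l : List α) (hl : l.Nodup) (n : Nat) (hn : n < l.length) (a t : Nat) :
    l[n] ∈ (l.drop a).take t ↔ a ≤ n ∧ n < a + t := by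
  constructor
  · intro h
    obtain ⟨m, hm, he⟩ := List.mem_iff_getElem.mp h
    have hm' : m < t ∧ m < l.length - a := by
      simpa [List.length_take, List.length_drop] using hm
    rw [List.getElem_take, List.getElem_drop] at he
    have := hl.getElem_inj_iff.mp he
    omega
  · rintro ⟨h1, h2⟩
    apply List.mem_iff_getElem.mpr
    refine ⟨n - a, by simp [List.length_take, List.length_drop]; omega, ?_⟩
    rw [List.getElem_take, List.getElem_drop]
    congr 1; omega

theorem mem_drop_iff {α : Type} [DecidableEq α] (l : List α) (hl : l.Nodup) (n : Nat) (hn : n < l.length) (a : Nat) :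
    l[n] ∈ l.drop a ↔ a ≤ n := by
  rw [← List.take_of_length_le (le_refl (l.drop a).length), List.length_drop]
  rw [mem_drop_take_iff l hl n hn a (l.length - a)]
  omega

-- how 'covers' evaluates in each of A's branches
theorem pvCov_plus_in {r : String} {k : Nat} (hplus : PySem.Str.isIn "+" r = true)
    (hc : pvOrder.contains (PySem.Str.replace r "+" "") = true)
    (hk : PySem.List.index? pvOrder (PySem.Str.replace r "+" "") = some k) (n : Nat) :
    pvCov r (n : Int) = decide (k ≤ n) := by
  simp only [pvCov, if_pos hplus, hc, hk, Option.getD_some, Bool.true_and]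
  simp

theorem pvCov_plus_out {r : String} (hplus : PySem.Str.isIn "+" r = true)
    (hc : ¬ pvOrder.contains (PySem.Str.replace r "+" "") = true) (i : Int) :
    pvCov r i = false := by
  simp only [pvCov, if_pos hplus]
  rw [Bool.eq_false_iff.mpr hc, Bool.false_and]

theorem pvCov_dash_in {r : String} {a b : Nat} (hplus : ¬ PySem.Str.isIn "+" r = true)
    (hdash : PySem.Str.isIn " - " r = true)
    (hc : (pvOrder.contains (PySem.List.pyGetD ((PySem.Str.split? r " - ").getD []) 0 "") &&
      pvOrder.contains (PySem.List.pyGetD ((PySem.Str.split? r " - ").getD []) 1 "")) = true)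
    (ha : PySem.List.index? pvOrder (PySem.List.pyGetD ((PySem.Str.split? r " - ").getD []) 0 "") = some a)
    (hb : PySem.List.index? pvOrder (PySem.List.pyGetD ((PySem.Str.split? r " - ").getD []) 1 "") = some b)
    (n : Nat) : pvCov r (n : Int) = decide (a ≤ n ∧ n ≤ b) := by
  simp only [pvCov, if_neg hplus, if_pos hdash, hc, ha, hb, Option.getD_some, Bool.true_and]
  simp

theorem pvCov_dash_out {r : String} (hplus : ¬ PySem.Str.isIn "+" r = true)
    (hdash : PySem.Str.isIn " - " r = true)
    (hc : ¬ (pvOrder.contains (PySem.List.pyGetD ((PySem.Str.split? r " - ").getD []) 0 "") &&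
      pvOrder.contains (PySem.List.pyGetD ((PySem.Str.split? r " - ").getD []) 1 "")) = true) (i : Int) :
    pvCov r i = false := by
  simp only [pvCov, if_neg hplus, if_pos hdash]
  rw [Bool.eq_false_iff.mpr hc, Bool.false_and]

theorem pvCov_single {r : String} (hplus : ¬ PySem.Str.isIn "+" r = true)
    (hdash : ¬ PySem.Str.isIn " - " r = true) (n : Nat) :
    pvCov r (n : Int) = (r == pvOrder.getD n "") := by
  simp only [pvCov, if_neg hplus, if_neg hdash, PySem.List.pyGetD_natCast]

-- if 'All' occurs, A's loop returns none
theorem pvLoopA_all : ∀ (ranges : List String) (av : PySem.Set String) (hp : Bool),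
    "All" ∈ ranges → pvLoopA ranges av hp = none := by
  intro ranges
  induction ranges with
  | nil => intro _ _ h; cases h
  | cons r rest ih =>
    intro av hp h
    by_cases hAll : (r == "All") = true
    · simp only [pvLoopA, if_pos hAll]
    · have hrest : "All" ∈ rest := by
        rcases List.mem_cons.mp h with rfl | h'
        · exact absurd (by simp) hAll
        · exact h'
      simp only [pvLoopA, if_neg hAll]
      split_ifs <;> exact ih _ _ hrest

-- if 'All' does not occur, A's loop returns, its has_plus flag is an 'any' over the tokens,
-- and membership of each known version in its set is exactly B's coverage predicate
theorem pvLoopA_char : ∀ (ranges : List String) (av : PySem.Set String) (hp : Bool),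
    "All" ∉ ranges →
    ∃ av', pvLoopA ranges av hp = some (av', hp || ranges.any (fun t => PySem.Str.isIn "+" t)) ∧
      ∀ n : Nat, n < 20 →
        (pvOrder.getD n "" ∈ av' ↔ pvOrder.getD n "" ∈ av ∨ (ranges.any (fun t => pvCov t (n : Int))) = true) := by
  intro ranges
  induction ranges with
  | nil =>
    intro av hp _
    exact ⟨av, by simp [pvLoopA], by simp⟩
  | cons r rest ih =>
    intro av hp hAllmem
    have hAll : ¬ (r == "All") = true := by
      simp only [beq_iff_eq]
      intro h; exact hAllmem (h ▸ List.mem_cons_self)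
    have hrest : "All" ∉ rest := fun h => hAllmem (List.mem_cons_of_mem _ h)
    by_cases hplus : PySem.Str.isIn "+" r = true
    · by_cases hc : pvOrder.contains (PySem.Str.replace r "+" "") = true
      · obtain ⟨k, hk⟩ := pv_index_of_contains hc
        obtain ⟨hklt, hke, _⟩ := PySem.List.getElem_of_index?_eq_some hk
        obtain ⟨av', he, hm⟩ := ih (PySem.Set.update (PySem.Set.add av (PySem.Str.replace r "+" ""))
          (PySem.List.slice pvOrder (some (k : Int)) none)) true hrest
        refine ⟨av', ?_, ?_⟩
        · simp only [pvLoopA, if_neg hAll, if_pos hplus, if_pos hc, hk, Option.getD_some]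
          rw [he]
          congr 1
          rw [List.any_cons, hplus]
          simp
        · intro n hn
          rw [hm n hn, PySem.Set.mem_update, PySem.Set.mem_add,
            PySem.List.slice_from_natCast, pv_getD_eq n hn,
            mem_drop_iff _ pv_nodup n (pv_len ▸ hn) k, ← pv_getD_eq n hn]
          rw [List.any_cons, pvCov_plus_in hplus hc hk n]
          have heq : pvOrder.getD n "" = PySem.Str.replace r "+" "" ↔ n = k := pv_eq_iff hk n hn
          by_cases hkn : k ≤ n
          · simp [hkn]
          · have hnk : ¬ n = k := by omega
            have heq' : ¬ pvOrder.getD n "" = PySem.Str.replace r "+" "" := fun h => hnk (heq.mp h)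
            simp only [Bool.or_eq_true, decide_eq_true_eq]
            tauto
      · obtain ⟨av', he, hm⟩ := ih (PySem.Set.add av (PySem.Str.replace r "+" "")) true hrest
        refine ⟨av', ?_, ?_⟩
        · simp only [pvLoopA, if_neg hAll, if_pos hplus, if_neg hc]
          rw [he]
          congr 1
          rw [List.any_cons, hplus]
          simp
        · intro n hn
          rw [hm n hn, PySem.Set.mem_add, List.any_cons, pvCov_plus_out hplus hc]
          have hne : ¬ pvOrder.getD n "" = PySem.Str.replace r "+" "" := by
            intro h
            exact hc (List.contains_iff_mem.mpr ((pv_mem_iff _).mpr ⟨n, hn, h.symm⟩))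
          simp only [Bool.false_or]
          tauto
    · by_cases hdash : PySem.Str.isIn " - " r = true
      · by_cases hc : (pvOrder.contains (PySem.List.pyGetD ((PySem.Str.split? r " - ").getD []) 0 "") &&
            pvOrder.contains (PySem.List.pyGetD ((PySem.Str.split? r " - ").getD []) 1 "")) = true
        · obtain ⟨hc0, hc1⟩ := (Bool.and_eq_true _ _).mp hc
          obtain ⟨a, hka⟩ := pv_index_of_contains hc0
          obtain ⟨b, hkb⟩ := pv_index_of_contains hc1
          obtain ⟨hblt, hbe, _⟩ := PySem.List.getElem_of_index?_eq_some hkb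
          have hb20 : b < 20 := pv_len ▸ hblt
          obtain ⟨av', he, hm⟩ := ih (PySem.Set.update av
            (PySem.List.slice pvOrder (some (a : Int)) (some ((b : Int) + 1)))) hp hrest
          refine ⟨av', ?_, ?_⟩
          · simp only [pvLoopA, if_neg hAll, if_neg hplus, if_pos hdash, if_pos hc, hka, hkb,
              Option.getD_some]
            rw [he]
            congr 1
            rw [List.any_cons, Bool.eq_false_iff.mpr hplus]
            simp
          · intro n hn
            rw [hm n hn, PySem.Set.mem_update]
            rw [show ((b : Int) + 1) = ((b + 1 : Nat) : Int) from by push_cast; ring,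
              PySem.List.slice_natCast, pv_getD_eq n hn,
              mem_drop_take_iff _ pv_nodup n (pv_len ▸ hn) a (b + 1 - a), ← pv_getD_eq n hn]
            rw [List.any_cons, pvCov_dash_in hplus hdash hc hka hkb n]
            by_cases hab : a ≤ n ∧ n ≤ b
            · have : a ≤ n ∧ n < a + (b + 1 - a) := by omega
              simp [this, hab]
            · have : ¬ (a ≤ n ∧ n < a + (b + 1 - a)) := by omega
              simp [this, hab]
        · obtain ⟨av', he, hm⟩ := ih av hp hrest
          refine ⟨av', ?_, ?_⟩
          · simp only [pvLoopA, if_neg hAll, if_neg hplus, if_pos hdash, if_neg hc]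
            rw [he]
            congr 1
            rw [List.any_cons, Bool.eq_false_iff.mpr hplus]
            simp
          · intro n hn
            rw [hm n hn, List.any_cons, pvCov_dash_out hplus hdash hc]
            simp
      · obtain ⟨av', he, hm⟩ := ih (PySem.Set.add av r) hp hrest
        refine ⟨av', ?_, ?_⟩
        · simp only [pvLoopA, if_neg hAll, if_neg hplus, if_neg hdash]
          rw [he]
          congr 1
          rw [List.any_cons, Bool.eq_false_iff.mpr hplus]
          simp
        · intro n hn
          rw [hm n hn, PySem.Set.mem_add, List.any_cons, pvCov_single hplus hdash n]
          simp only [Bool.or_eq_true, beq_iff_eq]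
          constructor
          · rintro ((h | h) | h)
            · exact Or.inl h
            · exact Or.inr (Or.inl h.symm)
            · exact Or.inr (Or.inr h)
          · rintro (h | h | h)
            · exact Or.inl (Or.inl h)
            · exact Or.inl (Or.inr h.symm)
            · exact Or.inr h

-- the covered cells, as a list of Nat indices
def pvJ (ranges : List String) : List Nat :=
  (List.range 20).filter (fun n => ranges.any (fun t => pvCov t (n : Int)))

theorem pvJ_pairwise (ranges : List String) : (pvJ ranges).Pairwise (· < ·) :=
  List.Pairwise.filter _ List.pairwise_lt_range

theorem mem_pvJ (ranges : List String) (n : Nat) :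
    n ∈ pvJ ranges ↔ n < 20 ∧ (ranges.any (fun t => pvCov t (n : Int))) = true := by
  simp [pvJ, List.mem_filter, List.mem_range]

def pvRho (n : Nat) : String := pvOrder.getD n ""

theorem pv_as_map : pvOrder = (List.range 20).map pvRho := by decide
theorem pv_rho_inj : ∀ a, a < 20 → ∀ b, b < 20 → (pvRho a = pvRho b ↔ a = b) := by decide

theorem contains_eq_decide {α : Type} [BEq α] [LawfulBEq α] (s : PySem.Set α) (x : α) :
    PySem.Set.contains s x = decide (x ∈ s) := by
  by_cases hm : x ∈ s
  · rw [(PySem.Set.contains_iff s x).mpr hm]; simp [hm]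
  · simp only [hm, decide_false]
    exact Bool.eq_false_iff.mpr (fun hb => hm ((PySem.Set.contains_iff s x).mp hb))

-- A's sorted_versions is the covered cells mapped through version_order
theorem pv_sv_eq {ranges : List String} {av : PySem.Set String}
    (h : ∀ n : Nat, n < 20 →
      (pvOrder.getD n "" ∈ av ↔ (ranges.any (fun t => pvCov t (n : Int))) = true)) :
    pvOrder.foldl (fun acc v => if PySem.Set.contains av v then acc ++ [v] else acc) [] =
      (pvJ ranges).map pvRho := by
  rw [PySem.List.foldl_append_if_eq_filter, List.nil_append]
  conv_lhs => rw [pv_as_map]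
  rw [List.filter_map]
  congr 1
  apply List.filter_congr
  intro n hn
  have hn20 : n < 20 := List.mem_range.mp hn
  simp only [Function.comp, contains_eq_decide]
  have := h n hn20
  rw [List.getD_eq_getElem?_getD] at this
  simp only [pvRho]
  by_cases hmem : (ranges.any (fun t => pvCov t (n : Int))) = true
  · simp [hmem, this.mpr hmem]
  · simp only [hmem]
    exact decide_eq_false (fun hv => hmem (this.mp hv))

-- B's covered list is the same cells as Ints
theorem pv_covered_eq (ranges : List String) :
    (PySem.List.pyRange 0 (pvOrder.length : Int) 1).filter (fun i => ranges.any (fun t => pvCov t i)) =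
      (pvJ ranges).map (fun n : Nat => (n : Int)) := by
  have h20 : PySem.List.pyRange 0 (pvOrder.length : Int) 1 = (List.range 20).map (fun n => ((n : Nat) : Int)) := by
    rw [pv_len]; decide
  rw [h20, List.filter_map, pvJ]
  apply congrArg
  apply List.filter_congr
  intro n _
  rfl

theorem pairwise_getElem_add_le (l : List Nat) (h : l.Pairwise (· < ·)) :
    ∀ (b : Nat) (hb : b < l.length) (a : Nat) (ha : a ≤ b), l[a]'(by omega) + (b - a) ≤ l[b]'(by omega) := by
  have hg := List.pairwise_iff_getElem.mp h
  intro b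
  induction b with
  | zero => intro hb a ha; have : a = 0 := by omega
            subst this; simp
  | succ k ih =>
    intro hb a ha
    rcases Nat.lt_succ_iff_lt_or_eq.mp (Nat.lt_succ_of_le ha) with hlt | rfl
    · have h1 := ih (by omega) a (by omega)
      have h2 := hg k (k + 1) (by omega) hb (by omega)
      omega
    · simp

theorem pv_le_getLast (l : List Nat) (h : l.Pairwise (· < ·)) (hne : l ≠ []) (n : Nat) (hn : n ∈ l) :
    n ≤ l.getLast hne := by
  obtain ⟨a, ha, rfl⟩ := List.mem_iff_getElem.mp hn
  rw [List.getLast_eq_getElem]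
  have := pairwise_getElem_add_le _ h (l.length - 1) (by
    have := List.length_pos_iff.mpr hne; omega) a (by omega)
  omega

theorem drop_take_map (a t : Nat) (h : a + t ≤ 20) :
    (pvOrder.drop a).take t = (List.range' a t).map pvRho := by
  apply List.ext_getElem
  · simp [List.length_take, List.length_drop, pv_len]
    omega
  · intro m h1 h2
    rw [List.getElem_take, List.getElem_drop, List.getElem_map, List.getElem_range']
    have e : a + 1 * m = a + m := by ring
    rw [e]
    simp only [pvRho]
    rw [pv_getD_eq (a + m) (by simp [List.length_take, List.length_drop, pv_len] at h1; omega)]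

theorem map_rho_inj : ∀ (J R : List Nat), (∀ n ∈ J, n < 20) → (∀ n ∈ R, n < 20) →
    (J.map pvRho = R.map pvRho ↔ J = R) := by
  intro J
  induction J with
  | nil => intro R _ _; cases R <;> simp
  | cons x xs ih =>
    intro R hJ hR
    cases R with
    | nil => simp
    | cons y ys =>
      simp only [List.map_cons, List.cons.injEq]
      rw [ih ys (fun n hn => hJ n (List.mem_cons_of_mem _ hn)) (fun n hn => hR n (List.mem_cons_of_mem _ hn))]
      rw [pv_rho_inj x (hJ x List.mem_cons_self) y (hR y List.mem_cons_self)]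

theorem pv_sandwich (l : List Nat) (h : l.Pairwise (· < ·)) (hne : l ≠ []) (m : Nat) (hm : m < l.length) :
    l.head hne + m ≤ l[m] ∧ l[m] + (l.length - 1 - m) ≤ l.getLast hne := by
  rw [List.head_eq_getElem hne, List.getLast_eq_getElem hne]
  have hlen : 0 < l.length := List.length_pos_iff.mpr hne
  have h1 := pairwise_getElem_add_le l h m hm 0 (Nat.zero_le m)
  have h2 := pairwise_getElem_add_le l h (l.length - 1) (by omega) m (by omega)
  omega

theorem pv_continuity (l : List Nat) (h : l.Pairwise (· < ·)) (hne : l ≠ []) :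
    (l = List.range' (l.head hne) (l.getLast hne + 1 - l.head hne)) ↔
      l.length = l.getLast hne + 1 - l.head hne := by
  have hfl : l.head hne ≤ l.getLast hne := pv_le_getLast l h hne _ (List.head_mem hne)
  constructor
  · intro he
    conv_lhs => rw [he]
    simp [List.length_range']
  · intro hl
    apply List.ext_getElem
    · simpa [List.length_range'] using hl
    · intro m h1 h2
      rw [List.getElem_range']
      have := pv_sandwich l h hne m h1
      omega

theorem pyGetD_neg_one {α : Type} (xs : List α) (d : α) (hne : xs ≠ []) :
    PySem.List.pyGetD xs (-1) d = xs.getLast hne := by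
  simp [PySem.List.pyGetD, PySem.List.pyGet?, PySem.List.pyIdx?]
  have hlen : 1 ≤ xs.length := by
    have := List.length_pos_iff.mpr hne; omega
  rw [if_pos hlen]
  simp only [Option.bind_some]
  rw [List.getElem?_eq_getElem (by omega), List.getLast_eq_getElem hne]
  rfl

theorem pyGetD_zero {α : Type} (xs : List α) (d : α) (hne : xs ≠ []) :
    PySem.List.pyGetD xs 0 d = xs.head hne := by
  simp [PySem.List.pyGetD, PySem.List.pyGet?, PySem.List.pyIdx?]
  cases xs with
  | nil => exact absurd rfl hne
  | cons x t => rfl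

theorem pv_idx_rho (n : Nat) (hn : n < 20) : PySem.List.index? pvOrder (pvRho n) = some n := pv_idx_at n hn

-- finish: A's post-loop formatting equals B's formatting from the covered cells
theorem pvFinish_rel (ranges : List String) (av : PySem.Set String)
    (h : ∀ n : Nat, n < 20 →
      (pvOrder.getD n "" ∈ av ↔ (ranges.any (fun t => pvCov t (n : Int))) = true)) :
    pvFinishA ranges av (ranges.any (fun t => PySem.Str.isIn "+" t)) =
      pvFinishB ranges ((pvJ ranges).map (fun n : Nat => (n : Int))) := by
  simp only [pvFinishA, pvFinishB]
  rw [pv_sv_eq h, List.isEmpty_map, List.isEmpty_map]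
  by_cases he : (pvJ ranges).isEmpty = true
  · rw [he]
    rfl
  · have hef : (pvJ ranges).isEmpty = false := Bool.eq_false_iff.mpr he
    rw [hef]
    simp only [Bool.false_eq_true, if_false]
    have hne : pvJ ranges ≠ [] := List.isEmpty_eq_false_iff.mp hef
    have hmapne : (pvJ ranges).map pvRho ≠ [] := fun hh => hne (List.map_eq_nil_iff.mp hh)
    have hintne : (pvJ ranges).map (fun n : Nat => (n : Int)) ≠ [] := fun hh => hne (List.map_eq_nil_iff.mp hh)
    have hfi20 : (pvJ ranges).head hne < 20 := ((mem_pvJ ranges _).mp (List.head_mem hne)).1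
    have hli20 : (pvJ ranges).getLast hne < 20 := ((mem_pvJ ranges _).mp (List.getLast_mem hne)).1
    have hfl : (pvJ ranges).head hne ≤ (pvJ ranges).getLast hne :=
      pv_le_getLast _ (pvJ_pairwise ranges) hne _ (List.head_mem hne)
    rw [pyGetD_zero _ _ hmapne, pyGetD_neg_one _ _ hmapne, List.head_map, List.getLast_map]
    rw [pyGetD_zero _ _ hintne, pyGetD_neg_one _ _ hintne, List.head_map, List.getLast_map]
    rw [pv_idx_rho _ hfi20, pv_idx_rho _ hli20]
    simp only [Option.getD_some]
    have hlm : (List.map (fun n : Nat => (n : Int)) (pvJ ranges)).length = (pvJ ranges).length :=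
      by simp
    rw [hlm]
    rw [show (((pvJ ranges).getLast hne : Int) + 1) = (((pvJ ranges).getLast hne + 1 : Nat) : Int) from by
      push_cast; ring]
    rw [PySem.List.slice_natCast, drop_take_map _ _ (by omega)]
    have hcondeq : ((pvJ ranges).map pvRho ==
        (List.range' ((pvJ ranges).head hne) ((pvJ ranges).getLast hne + 1 - (pvJ ranges).head hne)).map pvRho) =
        (((pvJ ranges).length : Int) ==
          ((pvJ ranges).getLast hne : Int) - ((pvJ ranges).head hne : Int) + 1) := by
      rw [Bool.eq_iff_iff, beq_iff_eq, beq_iff_eq]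
      rw [map_rho_inj _ _ (fun n hn => ((mem_pvJ ranges n).mp hn).1)
        (fun n hn => by have := List.mem_range'_1.mp hn; omega)]
      rw [pv_continuity _ (pvJ_pairwise ranges) hne]
      omega
    rw [hcondeq]
    by_cases hcont : (((pvJ ranges).length : Int) ==
        ((pvJ ranges).getLast hne : Int) - ((pvJ ranges).head hne : Int) + 1) = true
    · rw [hcont]
      simp only [if_true]
      have hL : (pvJ ranges).length = (pvJ ranges).getLast hne + 1 - (pvJ ranges).head hne := by
        have := beq_iff_eq.mp hcont
        omega
      have h19 : (((pvJ ranges).getLast hne : Nat) == pvOrder.length - 1) =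
          ((((pvJ ranges).getLast hne : Nat) : Int) == (pvOrder.length : Int) - 1) := by
        rw [Bool.eq_iff_iff, beq_iff_eq, beq_iff_eq, pv_len]
        omega
      simp only [h19]
      have hAtf : pvAt (((pvJ ranges).head hne : Nat) : Int) = pvRho ((pvJ ranges).head hne) := by
        simp only [pvAt, PySem.List.pyGetD_natCast, pvRho]
      have hAtl : pvAt (((pvJ ranges).getLast hne : Nat) : Int) = pvRho ((pvJ ranges).getLast hne) := by
        simp only [pvAt, PySem.List.pyGetD_natCast, pvRho]
      rw [hAtf, hAtl]
      have hlen1 : (((pvJ ranges).map pvRho).length == 1) =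
          ((((pvJ ranges).head hne : Nat) : Int) == (((pvJ ranges).getLast hne : Nat) : Int)) := by
        rw [Bool.eq_iff_iff, beq_iff_eq, beq_iff_eq, List.length_map, hL]
        omega
      simp only [hlen1]
    · rw [Bool.eq_false_iff.mpr hcont]
      simp only [Bool.false_eq_true, if_false]
      congr 1
      rw [List.map_map]
      apply List.map_congr_left
      intro n hn
      simp only [Function.comp, PySem.List.pyGetD_natCast, pvRho]

-- ===== VERDICT (by name: the statement is the Claim_ definition above) =====
theorem consolidate_ranges_spec : Claim_equal_consolidate_ranges := by
  intro ranges _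
  unfold Spec_consolidate_ranges consolidate_ranges consolidate_ranges_alt
  by_cases hAll : "All" ∈ ranges
  · rw [pvLoopA_all ranges PySem.Set.empty false hAll,
      if_pos (List.contains_iff_mem.mpr hAll)]
  · obtain ⟨av', he, hm⟩ := pvLoopA_char ranges PySem.Set.empty false hAll
    rw [he, if_neg (fun hc => hAll (List.contains_iff_mem.mp (by exact hc)))]
    have hm' : ∀ n : Nat, n < 20 →
        (pvOrder.getD n "" ∈ av' ↔ (ranges.any (fun t => pvCov t (n : Int))) = true) := by
      intro n hn
      rw [hm n hn]
      simp [PySem.Set.empty]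
    rw [Bool.false_or] at he
    rw [pv_covered_eq]
    exact pvFinish_rel ranges av' hm'
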